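-- pv_equiv track=rewrite | github.com/Lafuente-Law-LLC/python-practice | src/pal/project_02_lexer.py | tokenize_indentation
-- ===== SOURCE A (Python) =====
-- def tokenize_indentation(source: str) -> list[str]:
--     tokens = []
--     stack = [0]
--
--     lines = source.splitlines()
--     open_delims = 0
--
--     for line in lines:
--         line_stripped = line.lstrip()
--
--         if not line_stripped or line_stripped.startswith('#'):
--             continue
--
--         if open_delims == 0:
--             indent_level = len(line) - len(line_stripped)
--
--             if indent_level > stack[-1]:
--                 stack.append(indent_level)
--                 tokens.append("INDENT")
--             elif indent_level < stack[-1]: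
--                 while indent_level < stack[-1]:
--                     stack.pop()
--                     tokens.append("DEDENT")
--
--                 if stack[-1] != indent_level:
--                     raise IndentationError("warning")
--         open_delims += line.count('(')
--         open_delims -= line.count(')')
--     while len(stack) > 1:
--         stack.pop()
--         tokens.append("DEDENT")
--
--     return tokens
-- ===== SOURCE B (Python) =====
-- def tokenize_indentation(source: str) -> list[str]:
--     # pass 1: collect the indentation level of every significant line
--     # (non-blank, non-comment) that starts outside open parentheses
--     levels = []
--     open_delims = 0
--     for line in source.splitlines():
--         stripped = line.lstrip()
--         if stripped and not stripped.startswith('#'):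
--             if open_delims == 0:
--                 levels.append(len(line) - len(stripped))
--             open_delims += line.count('(') - line.count(')')
--     # pass 2: fold the levels through the indentation stack,
--     # removing dedented entries with a filter instead of a pop loop
--     tokens = []
--     stack = [0]
--     for level in levels:
--         keep = [x for x in stack if x <= level]
--         if len(keep) < len(stack):
--             tokens.extend(["DEDENT"] * (len(stack) - len(keep)))
--             if keep[-1] != level:
--                 raise IndentationError("warning")
--         elif level > keep[-1]:
--             keep = keep + [level]
--             tokens.append("INDENT")
--         stack = keep
--     tokens.extend(["DEDENT"] * (len(stack) - 1))
--     return tokens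
-- ===== Notes on version B (the rewrite author's own statement) =====
-- stated objective: alternative
-- what changed: B splits A's single interleaved loop into two passes - first extract the significant-line indentation levels while threading the paren counter, then fold those levels through the stack, replacing A's inner pop-while loop with a filter that removes all dedented entries at once and a replicate that emits the DEDENTs in one step.
import Mathlib
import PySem

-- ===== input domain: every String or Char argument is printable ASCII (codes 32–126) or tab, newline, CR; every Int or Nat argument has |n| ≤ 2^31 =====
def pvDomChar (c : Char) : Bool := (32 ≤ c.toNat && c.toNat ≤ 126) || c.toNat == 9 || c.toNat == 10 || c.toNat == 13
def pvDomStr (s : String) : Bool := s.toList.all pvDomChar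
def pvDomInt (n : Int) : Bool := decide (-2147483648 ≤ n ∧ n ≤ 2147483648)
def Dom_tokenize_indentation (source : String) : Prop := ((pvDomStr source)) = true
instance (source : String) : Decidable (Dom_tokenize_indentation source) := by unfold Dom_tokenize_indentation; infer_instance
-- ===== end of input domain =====

-- B re-implements A as two passes — level extraction, then a filter-based stack fold — same values;
-- objective: alternative decomposition, not speed. Where Python A raises IndentationError both ports
-- return [] (excluded by Pre_).

-- ===== PORT A =====
-- The Python stack list is represented reversed (head = Python stack[-1], i.e. the top;
-- Python's stack.append is cons, stack.pop is tail); the value 0 sits at the Lean list's end.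

-- 'while indent_level < stack[-1]: stack.pop(); tokens.append("DEDENT")'
def pvPopWhile (level : Int) (stack : List Int) (tokens : List String) : List String × List Int :=
  match stack with
  | [] => (tokens, [])            -- unreachable: 0 is always on the stack
  | top :: rest =>
    if level < top then pvPopWhile level rest (tokens ++ ["DEDENT"])
    else (tokens, top :: rest)

-- the 'for line in lines' loop; 'none' is Python's 'raise IndentationError("warning")'
def pvALoop (lines : List String) (tokens : List String) (stack : List Int) (od : Int) :
    Option (List String × List Int) :=
  match lines with
  | [] => some (tokens, stack)
  | line :: rest =>
    let st := PySem.Str.lstrip line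
    if st.toList.isEmpty || PySem.Str.startswith st "#" then pvALoop rest tokens stack od
    else
      let od' := od + (PySem.Str.count line "(" : Int) - (PySem.Str.count line ")" : Int)
      if od = 0 then
        let lvl := PySem.Str.len line - PySem.Str.len st
        let top := stack.headD 0                 -- stack[-1] (stack is never empty)
        if top < lvl then pvALoop rest (tokens ++ ["INDENT"]) (lvl :: stack) od'
        else if lvl < top then
          match pvPopWhile lvl stack tokens with
          | (t', s') => if s'.headD 0 ≠ lvl then none else pvALoop rest t' s' od'
        else pvALoop rest tokens stack od'
      else pvALoop rest tokens stack od'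

-- 'while len(stack) > 1: stack.pop(); tokens.append("DEDENT")'
def pvAFlush (stack : List Int) (tokens : List String) : List String :=
  match stack with
  | [] => tokens
  | [_] => tokens
  | _ :: rest => pvAFlush rest (tokens ++ ["DEDENT"])

def tokenize_indentation (source : String) : List String :=
  match pvALoop (PySem.Str.splitlines source) [] [0] 0 with
  | some (tokens, stack) => pvAFlush stack tokens
  | none => []                                   -- Python raises here; outside Pre_

-- ===== PORT B =====
-- pass 1 of Source B: indentation levels of significant lines seen with open_delims == 0
def pvLevels (lines : List String) (od : Int) : List Int :=
  match lines with
  | [] => []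
  | line :: rest =>
    let st := PySem.Str.lstrip line
    if st.toList.isEmpty || PySem.Str.startswith st "#" then pvLevels rest od
    else
      let od' := od + (PySem.Str.count line "(" : Int) - (PySem.Str.count line ")" : Int)
      if od = 0 then (PySem.Str.len line - PySem.Str.len st) :: pvLevels rest od'
      else pvLevels rest od'

-- pass 2 of Source B: fold the levels through the stack; dedents come from a filter
-- (stack reversed as in port A: Python's keep[-1] is Lean's head)
def pvBLoop (levels : List Int) (tokens : List String) (stack : List Int) :
    Option (List String × List Int) :=
  match levels with
  | [] => some (tokens, stack)
  | level :: rest =>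
    let keep := stack.filter (fun x => x ≤ level)
    if keep.length < stack.length then
      let tokens' := tokens ++ List.replicate (stack.length - keep.length) "DEDENT"
      if keep.headD 0 ≠ level then none          -- raise IndentationError("warning")
      else pvBLoop rest tokens' keep
    else if keep.headD 0 < level then pvBLoop rest (tokens ++ ["INDENT"]) (level :: keep)
    else pvBLoop rest tokens keep

def tokenize_indentation_alt (source : String) : List String :=
  match pvBLoop (pvLevels (PySem.Str.splitlines source) 0) [] [0] with
  | some (tokens, stack) => tokens ++ List.replicate (stack.length - 1) "DEDENT"
  | none => []                                   -- Source B raises here; outside Pre_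

-- ===== PRECONDITION & SPEC =====
-- helpers for stating Pre_ (comprehension-style, independent of the ports' loops):
-- a line counts iff it is neither blank nor a comment
def pvSignificantLine (line : String) : Bool :=
  !((PySem.Str.lstrip line).toList.isEmpty || PySem.Str.startswith (PySem.Str.lstrip line) "#")
def pvParenBalance (line : String) : Int :=
  (PySem.Str.count line "(" : Int) - (PySem.Str.count line ")" : Int)
def pvIndentOf (line : String) : Int := PySem.Str.len line - PySem.Str.len (PySem.Str.lstrip line)
-- indentation levels of the significant lines whose preceding significant lines have paren balance 0
def pvSigLevels (source : String) : List Int :=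
  (List.range (PySem.Str.splitlines source).length).filterMap (fun i =>
    if pvSignificantLine ((PySem.Str.splitlines source).getD i "") &&
       decide (((((PySem.Str.splitlines source).take i).filter pvSignificantLine).map pvParenBalance).sum = 0)
    then some (pvIndentOf ((PySem.Str.splitlines source).getD i ""))
    else none)

-- Pre_ excludes exactly the sources on which Python A raises IndentationError("warning"):
-- a significant line dedents to a level that is not on the indentation stack, i.e. some level
-- in the list pvSigLevels is positive, below its predecessor, and no earlier equal level is
-- still on the stack (followed only by levels ≥ it).
def Pre_tokenize_indentation (source : String) : Prop :=
  ∀ i < (pvSigLevels source).length,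
    (0 < i ∧ (pvSigLevels source).getD i 0 ≠ 0 ∧
     (pvSigLevels source).getD i 0 < (pvSigLevels source).getD (i - 1) 0) →
    ∃ j < i, (pvSigLevels source).getD j 0 = (pvSigLevels source).getD i 0 ∧
      ∀ k < i, j < k →
        (pvSigLevels source).getD i 0 ≤ (pvSigLevels source).getD k 0
instance (source : String) : Decidable (Pre_tokenize_indentation source) := by
  unfold Pre_tokenize_indentation; infer_instance

def pvWitness_tokenize_indentation : String := "a:\n  b\n    c\n  d\ne"

def Spec_tokenize_indentation (source : String) (out : List String) : Prop := out = tokenize_indentation_alt source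
instance (source : String) (out : List String) : Decidable (Spec_tokenize_indentation source out) := by unfold Spec_tokenize_indentation; infer_instance

-- ===== CLAIM (what is proved, stated in full; the proofs are below) =====
def Claim_equal_tokenize_indentation : Prop := ∀ (source : String), Dom_tokenize_indentation source → Pre_tokenize_indentation source → Spec_tokenize_indentation source (tokenize_indentation source)

-- ===== LEMMAS AND PROOFS =====

-- The two ports even agree (with []) on the raising inputs, so the proof below does not
-- consult Pre_; Pre_ still delimits where the two PYTHON programs return a value.

-- invariant of the indentation stack: strictly decreasing (head = top) and ending in 0
def pvInv (stack : List Int) : Prop :=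
  stack.Pairwise (· > ·) ∧ stack.getLast? = some 0

theorem pvPopWhile_eq_filter (level : Int) (stack : List Int) (tokens : List String)
    (hp : stack.Pairwise (· > ·)) :
    pvPopWhile level stack tokens =
      (tokens ++ List.replicate (stack.length - (stack.filter (fun x => x ≤ level)).length) "DEDENT",
       stack.filter (fun x => x ≤ level)) := by
  induction stack generalizing tokens with
  | nil => simp [pvPopWhile]
  | cons top rest ih =>
    rw [pvPopWhile]
    by_cases h : level < top
    · have hdrop : (top :: rest).filter (fun x => decide (x ≤ level)) =
          rest.filter (fun x => decide (x ≤ level)) := by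
        rw [List.filter_cons_of_neg (by simp; omega)]
      have hlen := List.length_filter_le (fun x => decide (x ≤ level)) rest
      rw [if_pos h, ih _ (List.Pairwise.of_cons hp), hdrop]
      refine Prod.ext ?_ rfl
      simp only [List.length_cons]
      rw [Nat.succ_sub hlen, List.replicate_succ]
      simp
    · have hker : ∀ x ∈ top :: rest, x ≤ level := by
        intro x hx
        rcases List.mem_cons.1 hx with rfl | hx
        · omega
        · have := List.rel_of_pairwise_cons hp hx; omega
      have hall : (top :: rest).filter (fun x => decide (x ≤ level)) = top :: rest :=
        List.filter_eq_self.mpr (by intro a ha; simpa using hker a ha)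
      rw [if_neg h, hall]
      simp

theorem pvHeadD_max (stack : List Int) (hp : stack.Pairwise (· > ·)) :
    ∀ x ∈ stack, x ≤ stack.headD 0 := by
  cases stack with
  | nil => simp
  | cons t r =>
    intro x hx
    rcases List.mem_cons.1 hx with rfl | hx
    · simp
    · have := List.rel_of_pairwise_cons hp hx
      simp; omega

theorem pvALoop_eq_pvBLoop (lines : List String) (tokens : List String) (stack : List Int)
    (od : Int) (hinv : pvInv stack) :
    pvALoop lines tokens stack od = pvBLoop (pvLevels lines od) tokens stack := by
  induction lines generalizing tokens stack od with
  | nil => simp [pvALoop, pvLevels, pvBLoop]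
  | cons line rest ih =>
    obtain ⟨hp, hlast⟩ := hinv
    obtain ⟨init, hstack⟩ : ∃ init, stack = init ++ [0] :=
      List.getLast?_eq_some_iff.mp hlast
    rw [pvALoop, pvLevels]
    by_cases hskip : (PySem.Str.lstrip line).toList.isEmpty
        || PySem.Str.startswith (PySem.Str.lstrip line) "#"
    · rw [if_pos hskip, if_pos hskip, ih _ _ _ ⟨hp, hlast⟩]
    · rw [if_neg hskip, if_neg hskip]
      by_cases hod : od = 0
      · rw [if_pos hod, if_pos hod, pvBLoop]
        set lvl := PySem.Str.len line - PySem.Str.len (PySem.Str.lstrip line) with hlvl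
        have hlvl0 : 0 ≤ lvl := by
          have hd := List.length_dropWhile_le PySem.Chars.isspace line.toList
          have h1 : PySem.Str.len line = (line.toList.length : Int) := rfl
          have h2 : PySem.Str.len (PySem.Str.lstrip line) =
              ((List.dropWhile PySem.Chars.isspace line.toList).length : Int) := by
            simp [PySem.Str.len, PySem.Str.lstrip, PySem.Chars.lstrip, String.toList_ofList]
          rw [hlvl, h1, h2]; omega
        have hne : stack ≠ [] := by rw [hstack]; simp
        by_cases hlt : stack.headD 0 < lvl
        · -- push: keep = stack
          have hall : stack.filter (fun x => decide (x ≤ lvl)) = stack :=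
            List.filter_eq_self.mpr (by
              intro a ha
              have := pvHeadD_max stack hp a ha
              simp; omega)
          rw [if_pos hlt]
          simp only [hall, lt_irrefl, if_false]
          rw [if_pos hlt]
          refine ih _ _ _ ⟨?_, ?_⟩
          · refine List.pairwise_cons.mpr ⟨?_, hp⟩
            intro a ha
            have := pvHeadD_max stack hp a ha
            omega
          · rw [hstack]
            rw [show lvl :: (init ++ [0]) = (lvl :: init) ++ [0] from rfl]
            exact List.getLast?_concat
        · rw [if_neg hlt]
          by_cases hgt : lvl < stack.headD 0
          · -- dedent: keep = filter, strictly shorter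
            rw [if_pos hgt, pvPopWhile_eq_filter _ _ _ hp]
            obtain ⟨t, r, rfl⟩ : ∃ t r, stack = t :: r := by
              cases stack with
              | nil => exact absurd rfl hne
              | cons t r => exact ⟨t, r, rfl⟩
            have hdrop : (t :: r).filter (fun x => decide (x ≤ lvl)) =
                r.filter (fun x => decide (x ≤ lvl)) := by
              rw [List.filter_cons_of_neg (by simp at hgt ⊢; omega)]
            have hlen := List.length_filter_le (fun x => decide (x ≤ lvl)) r
            have hshort : ((t :: r).filter (fun x => decide (x ≤ lvl))).length < (t :: r).length := by
              rw [hdrop]; simp; omega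
            rw [if_pos hshort]
            dsimp only
            by_cases hmis : ((t :: r).filter (fun x => decide (x ≤ lvl))).headD 0 ≠ lvl
            · rw [if_pos hmis, if_pos hmis]
            · rw [if_neg hmis, if_neg hmis]
              refine ih _ _ _ ⟨List.Pairwise.sublist List.filter_sublist hp, ?_⟩
              · -- getLast? of filter = some 0
                have h0 : init ++ [0] = t :: r := hstack.symm
                rw [← h0, List.filter_append]
                have : [(0:Int)].filter (fun x => decide (x ≤ lvl)) = [0] := by simp; omega
                rw [this, List.getLast?_concat]
          · -- equal: keep = stack, nothing happens
            have heq : stack.headD 0 = lvl := by omega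
            have hall : stack.filter (fun x => decide (x ≤ lvl)) = stack :=
              List.filter_eq_self.mpr (by
                intro a ha
                have := pvHeadD_max stack hp a ha
                simp; omega)
            rw [if_neg hgt]
            simp only [hall, lt_irrefl, if_false]
            rw [if_neg (by omega : ¬ (stack.headD 0 < lvl))]
            exact ih _ _ _ ⟨hp, hlast⟩
      · rw [if_neg hod, if_neg hod]
        exact ih _ _ _ ⟨hp, hlast⟩

theorem pvAFlush_eq (stack : List Int) (tokens : List String) :
    pvAFlush stack tokens = tokens ++ List.replicate (stack.length - 1) "DEDENT" := by
  induction stack generalizing tokens with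
  | nil => simp [pvAFlush]
  | cons x rest ih =>
    cases rest with
    | nil => simp [pvAFlush]
    | cons y r =>
      rw [show pvAFlush (x :: y :: r) tokens = pvAFlush (y :: r) (tokens ++ ["DEDENT"]) from rfl, ih]
      simp [List.replicate_succ, List.append_assoc]

-- ===== VERDICT (by name: the statement is the Claim_ definition above) =====
theorem tokenize_indentation_spec : Claim_equal_tokenize_indentation := by
  intro source _hdom _hpre
  unfold Spec_tokenize_indentation tokenize_indentation tokenize_indentation_alt
  rw [pvALoop_eq_pvBLoop _ _ _ _ ⟨by simp, by simp⟩]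
  cases pvBLoop (pvLevels (PySem.Str.splitlines source) 0) [] [0] with
  | none => rfl
  | some p => exact pvAFlush_eq p.2 p.1
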